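-- pv_equiv track=rewrite | github.com/rkolbi/CNC_Stuff | GRBL-Mini-Sender.py | clean_gcode_line
-- ===== SOURCE A (Python) =====
-- def clean_gcode_line(line: str) -> str:
--     s = line.strip()
--     if not s:
--         return ""
--
--     # Strip ( ... ) comments
--     out = []
--     in_paren = 0
--     for ch in s:
--         if ch == "(":
--             in_paren += 1
--         elif ch == ")":
--             in_paren = max(0, in_paren - 1)
--         elif in_paren == 0:
--             out.append(ch)
--     s = "".join(out).strip()
--
--     # Strip ; comments
--     if ";" in s:
--         s = s.split(";", 1)[0].strip()
--
--     if not s: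
--         return ""
--
--     # Normalize for older GRBL variants: uppercase and remove all whitespace.
--     s = "".join(s.split()).upper()
--     return s
-- ===== SOURCE B (Python) =====
-- def clean_gcode_line(line: str) -> str:
--     res = []
--     depth = 0
--     for ch in line:
--         if ch == "(":
--             depth += 1
--         elif ch == ")":
--             depth = max(0, depth - 1)
--         elif depth == 0:
--             if ch == ";":
--                 break
--             if not ch.isspace():
--                 res.append(ch.upper())
--     return "".join(res)
-- ===== Notes on version B (the rewrite author's own statement) =====
-- stated objective: simpler
-- what changed: Replaces A's three separate passes (paren-strip fold into a list, semicolon cut via split, join/split/upper normalization) with one left-to-right scan keeping a paren-depth counter that breaks on a top-level semicolon and collects uppercased non-whitespace chars directly.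
import Mathlib
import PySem

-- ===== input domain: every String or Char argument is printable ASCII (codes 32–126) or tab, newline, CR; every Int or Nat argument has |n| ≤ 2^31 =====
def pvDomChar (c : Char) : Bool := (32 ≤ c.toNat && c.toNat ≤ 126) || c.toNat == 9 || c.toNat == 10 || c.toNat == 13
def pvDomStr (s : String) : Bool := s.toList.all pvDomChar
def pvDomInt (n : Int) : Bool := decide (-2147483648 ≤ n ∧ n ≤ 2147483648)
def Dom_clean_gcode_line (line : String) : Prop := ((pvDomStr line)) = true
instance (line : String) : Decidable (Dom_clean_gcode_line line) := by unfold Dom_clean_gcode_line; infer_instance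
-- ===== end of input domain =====

-- B replaces A's three passes (paren fold, ';' split, join/split/upper) by one scan with a depth counter; objective: simpler.

-- ===== PORT A =====
-- Literal transliteration of A on the character list (PySem.Chars.* are the Python string methods).
def clean_gcode_line (line : String) : String :=
  let s := PySem.Chars.strip line.toList
  if s.isEmpty then "" else
    -- for ch in s: build out, in_paren   (max(0, n-1) is Nat subtraction)
    let st := s.foldl (fun (acc : List Char × Nat) ch =>
        if ch = '(' then (acc.1, acc.2 + 1)
        else if ch = ')' then (acc.1, acc.2 - 1)
        else if acc.2 = 0 then (acc.1 ++ [ch], acc.2)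
        else acc) (([] : List Char), 0)
    let s1 := PySem.Chars.strip (PySem.Chars.join [] (st.1.map (fun c => [c])))
    let s2 := if PySem.Chars.isIn [';'] s1
      then PySem.Chars.strip ((PySem.Chars.splitOnMax s1 [';'] 1).headD [])
      else s1
    if s2.isEmpty then "" else
      String.ofList (PySem.Chars.upper (PySem.Chars.join [] (PySem.Chars.split₀ s2)))

-- ===== PORT B =====
-- B's single scan: depth counter, break on top-level ';', collect uppercased non-space chars.
def scanGo : List Char → Nat → List Char
  | [], _ => []
  | c :: cs, d =>
    if c = '(' then scanGo cs (d + 1)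
    else if c = ')' then scanGo cs (d - 1)
    else if d = 0 then
      if c = ';' then []
      else if PySem.Chars.isspace c then scanGo cs 0
      else PySem.Chars.upperChar c :: scanGo cs 0
    else scanGo cs d

def clean_gcode_line_alt (line : String) : String :=
  String.ofList (scanGo line.toList 0)

-- ===== PRECONDITION & SPEC =====
def Spec_clean_gcode_line (line : String) (out : String) : Prop := out = clean_gcode_line_alt line
instance (line : String) (out : String) : Decidable (Spec_clean_gcode_line line out) := by unfold Spec_clean_gcode_line; infer_instance

-- ===== CLAIM (what is proved, stated in full; the proofs are below) =====
def Claim_equal_clean_gcode_line : Prop := ∀ (line : String), Dom_clean_gcode_line line → Spec_clean_gcode_line line (clean_gcode_line line)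

-- ===== LEMMAS AND PROOFS =====

-- A's paren-stripping fold, written as structural recursion (proof helper).
def parenOut : List Char → Nat → List Char
  | [], _ => []
  | c :: cs, d =>
    if c = '(' then parenOut cs (d + 1)
    else if c = ')' then parenOut cs (d - 1)
    else if d = 0 then c :: parenOut cs d
    else parenOut cs d

-- not-whitespace predicate
def nsp (c : Char) : Bool := !PySem.Chars.isspace c

-- the value A's pipeline computes after paren strip, ';' cut and whitespace removal
def fcore (x : List Char) : List Char := (x.takeWhile (· ≠ ';')).filter nsp
def core (x : List Char) (d : Nat) : List Char := fcore (parenOut x d)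

theorem foldl_parenOut (cs : List Char) (acc : List Char) (d : Nat) :
    (cs.foldl (fun (acc : List Char × Nat) ch =>
        if ch = '(' then (acc.1, acc.2 + 1)
        else if ch = ')' then (acc.1, acc.2 - 1)
        else if acc.2 = 0 then (acc.1 ++ [ch], acc.2)
        else acc) (acc, d)).1 = acc ++ parenOut cs d := by
  induction cs generalizing acc d with
  | nil => simp [parenOut]
  | cons c cs ih =>
    simp only [List.foldl_cons, parenOut]
    by_cases h1 : c = '('
    · simp [h1, ih]
    · by_cases h2 : c = ')'
      · simp [h1, h2, ih]
      · by_cases h3 : d = 0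
        · simp [h1, h2, h3, ih]
        · simp [h1, h2, h3, ih]

theorem join_nil_flatten (parts : List (List Char)) :
    PySem.Chars.join [] parts = parts.flatten := by
  induction parts with
  | nil => rfl
  | cons p ps ih =>
    cases ps with
    | nil => simp [PySem.Chars.join, List.intercalate]
    | cons q qs =>
      rw [PySem.Chars.join_cons_cons]
      simp [ih]

theorem split₀_go_flatten (rest cur : List Char) (acc : List (List Char)) :
    (PySem.Chars.split₀.go rest cur acc).flatten
      = acc.reverse.flatten ++ cur.reverse ++ rest.filter nsp := by
  induction rest generalizing cur acc with
  | nil =>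
    by_cases h : cur.isEmpty <;>
      simp_all [PySem.Chars.split₀.go, List.isEmpty_iff, nsp]
  | cons c cs ih =>
    simp only [PySem.Chars.split₀.go]
    by_cases hs : PySem.Chars.isspace c
    · by_cases h : cur.isEmpty <;>
        simp_all [List.isEmpty_iff, nsp, List.filter_cons]
    · simp [hs, ih, nsp, List.filter_cons]

theorem join_split₀ (x : List Char) :
    PySem.Chars.join [] (PySem.Chars.split₀ x) = x.filter nsp := by
  rw [join_nil_flatten, PySem.Chars.split₀, split₀_go_flatten]
  simp

-- filter nsp ignores leading-whitespace removal
theorem filter_dropWhile (x : List Char) :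
    (x.dropWhile PySem.Chars.isspace).filter nsp = x.filter nsp := by
  induction x with
  | nil => rfl
  | cons c cs ih =>
    by_cases h : PySem.Chars.isspace c <;>
      simp [List.dropWhile_cons, List.filter_cons, h, nsp, ih]

-- every list splits as its rstrip plus an all-whitespace tail
theorem rstrip_decomp (x : List Char) :
    PySem.Chars.rstrip x ++ (x.reverse.takeWhile PySem.Chars.isspace).reverse = x
      ∧ ∀ c ∈ (x.reverse.takeWhile PySem.Chars.isspace).reverse, PySem.Chars.isspace c := by
  constructor
  · rw [PySem.Chars.rstrip, ← List.reverse_append, List.takeWhile_append_dropWhile,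
      List.reverse_reverse]
  · intro c hc
    exact List.mem_takeWhile_imp (List.mem_reverse.mp hc)

theorem filter_strip (x : List Char) :
    (PySem.Chars.strip x).filter nsp = x.filter nsp := by
  obtain ⟨hdec, hws⟩ := rstrip_decomp (PySem.Chars.lstrip x)
  have hnil : (((PySem.Chars.lstrip x).reverse.takeWhile PySem.Chars.isspace).reverse).filter nsp = [] := by
    rw [List.filter_eq_nil_iff]
    intro c hc
    simp [nsp, hws c hc]
  have h1 : (PySem.Chars.lstrip x).filter nsp = (PySem.Chars.strip x).filter nsp := by
    conv_lhs => rw [← hdec]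
    rw [List.filter_append, hnil, List.append_nil, PySem.Chars.strip]
  rw [← h1, PySem.Chars.lstrip, filter_dropWhile]

-- splitOnMax with maxsplit already exhausted returns the remainder as one part
theorem splitOnMax_go_zero (fuel : Nat) (l cur : List Char) (acc : List (List Char)) :
    PySem.Chars.splitOnMax.go [';'] fuel 0 l cur acc = ((cur.reverse ++ l) :: acc).reverse := by
  cases fuel with
  | zero => rfl
  | succ f => cases l <;> simp [PySem.Chars.splitOnMax.go]

-- first part of split(';', 1) is the prefix before the first ';'
theorem splitOnMax_go_one (fuel : Nat) (l cur : List Char) (h : l.length < fuel) :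
    (PySem.Chars.splitOnMax.go [';'] fuel 1 l cur []).headD []
      = cur.reverse ++ l.takeWhile (· ≠ ';') := by
  induction fuel generalizing l cur with
  | zero => omega
  | succ f ih =>
    cases l with
    | nil => simp [PySem.Chars.splitOnMax.go]
    | cons c cs =>
      simp only [PySem.Chars.splitOnMax.go]
      by_cases hc : c = ';'
      · subst hc
        simp only [if_neg (by omega : ¬ (1 = 0))]
        rw [if_pos (by simp [List.isPrefixOf])]
        rw [splitOnMax_go_zero]
        simp [List.takeWhile_cons]
      · simp only [if_neg (by omega : ¬ (1 = 0))]
        rw [if_neg (by simp [List.isPrefixOf]; exact fun he => hc he.symm)]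
        rw [ih cs (c :: cur) (by simpa using Nat.lt_of_succ_lt_succ h)]
        simp [List.takeWhile_cons, hc, Ne.symm hc]

theorem headD_splitOnMax (l : List Char) :
    (PySem.Chars.splitOnMax l [';'] 1).headD [] = l.takeWhile (· ≠ ';') := by
  rw [PySem.Chars.splitOnMax]
  rw [if_neg (by omega)]
  have := splitOnMax_go_one (l.length + 1) l [] (by omega)
  simpa using this

theorem takeWhile_of_no_semi (l : List Char) (h : ';' ∉ l) :
    l.takeWhile (· ≠ ';') = l := by
  induction l with
  | nil => rfl
  | cons c cs ih =>
    simp only [List.mem_cons, not_or] at h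
    have hc : c ≠ ';' := fun he => h.1 he.symm
    rw [List.takeWhile_cons, if_pos (by simp [hc]), ih h.2]

theorem isIn_semi_iff (l : List Char) :
    PySem.Chars.isIn [';'] l = true ↔ ';' ∈ l := by
  rw [PySem.Chars.isIn_iff_infix]
  constructor
  · intro h; exact (List.singleton_sublist.mp h.sublist)
  · intro h
    obtain ⟨s, t, rfl⟩ := List.append_of_mem h
    exact ⟨s, t, by simp⟩

-- fcore ignores leading whitespace …
theorem fcore_dropWhile (x : List Char) :
    fcore (x.dropWhile PySem.Chars.isspace) = fcore x := by
  induction x with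
  | nil => rfl
  | cons c cs ih =>
    by_cases h : PySem.Chars.isspace c
    · have hne : c ≠ ';' := by intro hc; subst hc; simp [PySem.Chars.isspace] at h
      simp only [List.dropWhile_cons, h, if_pos]
      rw [ih]
      simp [fcore, List.takeWhile_cons, hne, List.filter_cons, nsp, h]
    · simp [List.dropWhile_cons, h]

-- … and trailing whitespace
theorem fcore_append_ws (x ws : List Char) (hws : ∀ c ∈ ws, PySem.Chars.isspace c) :
    fcore (x ++ ws) = fcore x := by
  induction x with
  | nil =>
    simp only [List.nil_append]
    induction ws with
    | nil => rfl
    | cons c cs ih =>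
      have hc := hws c (by simp)
      have hne : c ≠ ';' := by intro h; subst h; simp [PySem.Chars.isspace] at hc
      rw [show fcore (c :: cs) = fcore cs by
        simp [fcore, List.takeWhile_cons, hne, List.filter_cons, nsp, hc]]
      exact ih (fun d hd => hws d (by simp [hd]))
  | cons c cs ih =>
    by_cases hc : c = ';'
    · subst hc; simp [fcore, List.takeWhile_cons]
    · simp only [List.cons_append]
      simp [fcore, List.takeWhile_cons, hc, List.filter_cons] at ih ⊢
      rw [ih]

theorem fcore_strip (x : List Char) : fcore (PySem.Chars.strip x) = fcore x := by
  obtain ⟨hdec, hws⟩ := rstrip_decomp (PySem.Chars.lstrip x)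
  rw [PySem.Chars.strip]
  have h1 : fcore (PySem.Chars.lstrip x) = fcore (PySem.Chars.rstrip (PySem.Chars.lstrip x)) := by
    conv_lhs => rw [← hdec]
    exact fcore_append_ws _ _ hws
  rw [← h1, PySem.Chars.lstrip, fcore_dropWhile]

-- core ignores leading whitespace and all-whitespace tails of the raw input
theorem core_dropWhile (x : List Char) :
    core (x.dropWhile PySem.Chars.isspace) 0 = core x 0 := by
  induction x with
  | nil => rfl
  | cons c cs ih =>
    by_cases h : PySem.Chars.isspace c
    · have h1 : c ≠ '(' := by intro hc; subst hc; simp [PySem.Chars.isspace] at h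
      have h2 : c ≠ ')' := by intro hc; subst hc; simp [PySem.Chars.isspace] at h
      have h3 : c ≠ ';' := by intro hc; subst hc; simp [PySem.Chars.isspace] at h
      simp only [List.dropWhile_cons, h, if_pos]
      rw [ih]
      simp [core, parenOut, h1, h2, fcore, List.takeWhile_cons, h3, List.filter_cons, nsp, h]
    · simp [List.dropWhile_cons, h]

theorem core_ws (ws : List Char) (d : Nat) (hws : ∀ c ∈ ws, PySem.Chars.isspace c) :
    core ws d = [] := by
  induction ws generalizing d with
  | nil => rfl
  | cons c cs ih =>
    have hc := hws c (by simp)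
    have h1 : c ≠ '(' := by intro h; subst h; simp [PySem.Chars.isspace] at hc
    have h2 : c ≠ ')' := by intro h; subst h; simp [PySem.Chars.isspace] at hc
    have h3 : c ≠ ';' := by intro h; subst h; simp [PySem.Chars.isspace] at hc
    have ih' := fun d => ih d (fun e he => hws e (by simp [he]))
    by_cases hd : d = 0
    · subst hd
      simpa [core, parenOut, h1, h2, fcore, List.takeWhile_cons, h3, List.filter_cons, nsp, hc]
        using ih' 0
    · simpa [core, parenOut, h1, h2, hd] using ih' d

theorem core_append_ws (x ws : List Char) (d : Nat) (hws : ∀ c ∈ ws, PySem.Chars.isspace c) :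
    core (x ++ ws) d = core x d := by
  induction x generalizing d with
  | nil => simpa [core, parenOut] using core_ws ws d hws
  | cons c cs ih =>
    by_cases h1 : c = '('
    · subst h1; simp only [List.cons_append]
      simp [core, parenOut] at ih ⊢; rw [ih]
    · by_cases h2 : c = ')'
      · subst h2; simp only [List.cons_append]
        simp [core, parenOut] at ih ⊢; rw [ih]
      · by_cases hd : d = 0
        · subst hd
          by_cases h3 : c = ';'
          · subst h3; simp [core, parenOut, fcore, List.takeWhile_cons]
          · simp only [List.cons_append]
            simp [core, parenOut, h1, h2, fcore, List.takeWhile_cons, h3,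
              List.filter_cons] at ih ⊢
            rw [ih]
        · simp only [List.cons_append]
          simp [core, parenOut, h1, h2, hd] at ih ⊢; rw [ih]

theorem core_strip (x : List Char) : core (PySem.Chars.strip x) 0 = core x 0 := by
  obtain ⟨hdec, hws⟩ := rstrip_decomp (PySem.Chars.lstrip x)
  rw [PySem.Chars.strip]
  have h1 : core (PySem.Chars.lstrip x) 0 = core (PySem.Chars.rstrip (PySem.Chars.lstrip x)) 0 := by
    conv_lhs => rw [← hdec]
    exact core_append_ws _ _ 0 hws
  rw [← h1, PySem.Chars.lstrip, core_dropWhile]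

-- the main bridge: A's composed passes equal B's single scan
theorem core_scan (cs : List Char) (d : Nat) :
    (core cs d).map PySem.Chars.upperChar = scanGo cs d := by
  induction cs generalizing d with
  | nil => rfl
  | cons c cs ih =>
    by_cases h1 : c = '('
    · subst h1; simp [core, parenOut, scanGo] at ih ⊢; exact ih _
    · by_cases h2 : c = ')'
      · subst h2; simp [core, parenOut, scanGo, h1] at ih ⊢; exact ih _
      · by_cases hd : d = 0
        · subst hd
          by_cases h3 : c = ';'
          · subst h3
            simp [core, parenOut, scanGo, fcore, List.takeWhile_cons]
          · by_cases h4 : PySem.Chars.isspace c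
            · simp [core, parenOut, scanGo, h1, h2, h3, h4, fcore, List.takeWhile_cons,
                List.filter_cons, nsp] at ih ⊢
              exact ih _
            · simp [core, parenOut, scanGo, h1, h2, h3, h4, fcore, List.takeWhile_cons,
                List.filter_cons, nsp] at ih ⊢
              rw [← ih 0]
        · simp [core, parenOut, scanGo, h1, h2, hd] at ih ⊢; exact ih _

theorem scan_eq (l : List Char) :
    scanGo l 0 = ((core (PySem.Chars.strip l) 0).map PySem.Chars.upperChar) := by
  rw [core_strip, core_scan]

-- ===== VERDICT (by name: the statement is the Claim_ definition above) =====
theorem clean_gcode_line_spec : Claim_equal_clean_gcode_line := by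
  intro line _
  unfold Spec_clean_gcode_line clean_gcode_line clean_gcode_line_alt
  simp only []
  set l := line.toList with hl
  by_cases hs : (PySem.Chars.strip l).isEmpty
  · rw [if_pos hs, scan_eq, List.isEmpty_iff.mp hs]
    rfl
  · rw [if_neg hs]
    rw [scan_eq]
    set s := PySem.Chars.strip l with hsdef
    rw [foldl_parenOut s [] 0, List.nil_append, PySem.Chars.join_nil_singletons]
    set s1 := PySem.Chars.strip (parenOut s 0) with hs1
    set s2 := (if PySem.Chars.isIn [';'] s1 = true
      then PySem.Chars.strip ((PySem.Chars.splitOnMax s1 [';'] 1).headD [])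
      else s1) with hs2
    have key : s2.filter nsp = core s 0 := by
      have h1 : s2.filter nsp = (s1.takeWhile (· ≠ ';')).filter nsp := by
        by_cases hin : PySem.Chars.isIn [';'] s1 = true
        · rw [hs2, if_pos hin, headD_splitOnMax, filter_strip]
        · rw [hs2, if_neg hin]
          rw [takeWhile_of_no_semi s1 (fun hmem => hin ((isIn_semi_iff s1).mpr hmem))]
      rw [h1]
      have : (s1.takeWhile (· ≠ ';')).filter nsp = fcore s1 := rfl
      rw [this, hs1, fcore_strip]
      rfl
    by_cases h2 : s2.isEmpty
    · rw [if_pos h2]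
      have : s2 = [] := List.isEmpty_iff.mp h2
      rw [this] at key
      rw [← key]
      rfl
    · rw [if_neg h2, join_split₀, key, PySem.Chars.upper]
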